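/- GENERATED by farm/mkstatement.py from design/units.tsv (unit `start_decoder.C13b`) and the assertions of Vorbis/Spec/StartDecoderC13.lean — do not edit.
   THE STATEMENT of the proof unit `start_decoder.C13b`: segment C13b of `start_decoder` (21 instructions; entries 0x114f32;
   exits 0x115057,0x114f78; ranges 0x114f32-0x114f75 + 0x11504e-0x115053)
   takes each of its entry assertions to one of its exit assertions (`Vorbis.Spec.StartDecoder.SegC13b`), given the contracts of its callees.
   What the names mean: Vorbis/Spec/Basic.lean (the shared hypotheses), Vorbis/Spec/StartDecoderC13.lean (the assertions). The theorem to prove: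
   `theorem start_decoder_C13b_ok : Vorbis.Spec.start_decoder_C13b.Statement`. -/
import Vorbis.Spec.StartDecoderC13
namespace Vorbis.Spec.start_decoder_C13b
open X86 X86.User Asan

/-- The statement of unit `start_decoder.C13b`. -/
def Statement : Prop :=
  ∀ (Lay : Layout) (_hLay : Lay.hi = 0x1000000) (μ : Microarch) (_hμ : UserX.MicroOK μ) (u₀ : State)
    (_hcode : HasCodeNat Lay u₀ Vorbis.L.start_decoder.entry Vorbis.Code.code_start_decoder.nat Vorbis.L.start_decoder.size)
    (_h_asan_load4_noabort : Asan.SmallCheck Lay μ Vorbis.WayInv (Vorbis.CodeOK u₀) [.rax, .rcx, .rdx] 4 Vorbis.L.__asan_load4_noabort.entry),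
    Vorbis.Spec.StartDecoder.SegC13b Lay μ u₀

end Vorbis.Spec.start_decoder_C13b
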